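-- pv_equiv track=rewrite | github.com/NedraMekni/Advent-of-code-2023 | 3rd_December/Day_3_pt1.py | get_numbers_coordinates
-- ===== SOURCE A (Python) =====
-- def get_numbers_coordinates(matrix):
-- 	number_dict={}
--
-- 	for i in range(len(matrix)):
--
-- 		l=matrix[i]
--
-- 		index_l= 0
-- 		number_acc = ''
-- 		index_acc = []
--
-- 		for c in l:
-- 			if c.isdigit():
-- 				number_acc+=c
-- 				index_acc.append((i,index_l))
--
-- 			else:
-- 				if len(number_acc)!=0:
-- 					number_dict[number_acc+" "+ str(i)+" "+ str(index_l)]=index_acc.copy()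
-- 					number_acc=''
-- 					index_acc=[]
-- 			index_l+=1
--
-- 		if len(number_acc)!=0:
-- 			number_dict[number_acc+" "+ str(i)+" "+ str(index_l)]=index_acc.copy()
--
-- 	return number_dict
-- ===== SOURCE B (Python) =====
-- def get_numbers_coordinates(matrix):
--     result = {}
--     for i, line in enumerate(matrix):
--         j, n = 0, len(line)
--         while j < n:
--             if not line[j].isdigit():
--                 j += 1
--                 continue
--             k = j
--             while k < n and line[k].isdigit():
--                 k += 1
--             result[line[j:k] + " " + str(i) + " " + str(k)] = [(i, c) for c in range(j, k)]
--             j = k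
--     return result
-- ===== Notes on version B (the rewrite author's own statement) =====
-- stated objective: simpler
-- what changed: Replaces A's per-character accumulator/flush state machine with a per-row run scanner that finds each maximal digit run, slices it out, and emits its key and coordinate list in one step.
import Mathlib
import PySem

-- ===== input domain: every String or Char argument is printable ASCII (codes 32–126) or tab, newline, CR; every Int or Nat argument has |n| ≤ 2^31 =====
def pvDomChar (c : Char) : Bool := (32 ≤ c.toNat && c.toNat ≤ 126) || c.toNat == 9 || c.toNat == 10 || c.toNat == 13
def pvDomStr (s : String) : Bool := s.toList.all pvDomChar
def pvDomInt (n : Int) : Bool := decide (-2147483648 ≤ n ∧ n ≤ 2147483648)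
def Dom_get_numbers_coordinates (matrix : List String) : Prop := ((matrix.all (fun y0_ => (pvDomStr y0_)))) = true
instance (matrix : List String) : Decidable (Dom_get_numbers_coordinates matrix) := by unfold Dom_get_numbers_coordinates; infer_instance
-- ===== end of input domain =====

-- B replaces A's per-character accumulator/flush state machine with a run-scanner that
-- finds each maximal digit run and emits its key and coordinates in one step (objective: simpler).

-- shared key builder: number_acc + " " + str(i) + " " + str(end_col)
def keyOf (i : Int) (endCol : Int) (acc : List Char) : String :=
  String.mk acc ++ " " ++ PySem.Int.toStr i ++ " " ++ PySem.Int.toStr endCol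

-- ===== PORT A =====
-- A's inner-loop state: (index_l, number_acc, index_acc, number_dict)
def aStep (i : Int)
    (st : Int × List Char × List (Int × Int) × PySem.Dict String (List (Int × Int)))
    (c : Char) : Int × List Char × List (Int × Int) × PySem.Dict String (List (Int × Int)) :=
  let (idx, acc, iacc, d) := st
  if PySem.Chars.isdigit c then
    (idx + 1, acc ++ [c], iacc ++ [(i, idx)], d)
  else if acc = [] then
    (idx + 1, acc, iacc, d)
  else
    (idx + 1, ([] : List Char), ([] : List (Int × Int)), d.insert (keyOf i idx acc) iacc)

-- the trailing 'if len(number_acc)!=0' flush after the inner loop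
def aFlush (i : Int)
    (st : Int × List Char × List (Int × Int) × PySem.Dict String (List (Int × Int))) :
    PySem.Dict String (List (Int × Int)) :=
  let (idx, acc, iacc, d) := st
  if acc = [] then d else d.insert (keyOf i idx acc) iacc

def aRow (i : Int) (d : PySem.Dict String (List (Int × Int))) (l : String) :
    PySem.Dict String (List (Int × Int)) :=
  aFlush i (l.toList.foldl (aStep i) (0, [], [], d))

def get_numbers_coordinates (matrix : List String) : List (String × List (Int × Int)) :=
  ((PySem.List.enumerate matrix 0).foldl (fun d p => aRow p.1 d p.2) PySem.Dict.empty).items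

-- ===== PORT B =====
-- inner 'while k < n and line[k].isdigit(): k += 1' plus the slice line[j:k], as span on the suffix
def bTakeRun : List Char → List Char × List Char
  | [] => ([], [])
  | c :: rest =>
    if PySem.Chars.isdigit c then
      let p := bTakeRun rest
      (c :: p.1, p.2)
    else ([], c :: rest)

theorem bTakeRun_snd_length_le : ∀ cs : List Char, (bTakeRun cs).2.length ≤ cs.length := by
  intro cs
  induction cs with
  | nil => simp [bTakeRun]
  | cons c rest ih =>
    simp only [bTakeRun]
    split
    · exact Nat.le_succ_of_le ih
    · simp

-- outer 'while j < n' over the suffix of the line starting at column j (exact: cs is line[j:])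
def bInner (i : Int) (j : Int) (cs : List Char) (d : PySem.Dict String (List (Int × Int))) :
    PySem.Dict String (List (Int × Int)) :=
  match cs with
  | [] => d
  | c :: rest =>
    if PySem.Chars.isdigit c then
      let ds := (bTakeRun (c :: rest)).1
      let k := j + (ds.length : Int)
      bInner i k (bTakeRun (c :: rest)).2
        (d.insert (keyOf i k ds) ((PySem.List.pyRange j k 1).map (fun col => (i, col))))
    else bInner i (j + 1) rest d
termination_by cs.length
decreasing_by
  · simp only [bTakeRun, *, if_pos]
    exact Nat.lt_succ_of_le (bTakeRun_snd_length_le rest)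
  · simp

def get_numbers_coordinates_alt (matrix : List String) : List (String × List (Int × Int)) :=
  ((PySem.List.enumerate matrix 0).foldl (fun d p => bInner p.1 0 p.2.toList d)
    PySem.Dict.empty).items

-- ===== PRECONDITION & SPEC =====
def Spec_get_numbers_coordinates (matrix : List String) (out : List (String × List (Int × Int))) : Prop := out = get_numbers_coordinates_alt matrix
instance (matrix : List String) (out : List (String × List (Int × Int))) : Decidable (Spec_get_numbers_coordinates matrix out) := by unfold Spec_get_numbers_coordinates; infer_instance

-- ===== CLAIM (what is proved, stated in full; the proofs are below) =====
def Claim_equal_get_numbers_coordinates : Prop := ∀ (matrix : List String), Dom_get_numbers_coordinates matrix → Spec_get_numbers_coordinates matrix (get_numbers_coordinates matrix)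

-- ===== LEMMAS AND PROOFS =====

-- the list of (key, coordinates) entries A's inner loop inserts, given a pending partial run
def runsAux (i : Int) (acc : List Char) (iacc : List (Int × Int)) (j : Int) :
    List Char → List (String × List (Int × Int))
  | [] => if acc = [] then [] else [(keyOf i j acc, iacc)]
  | c :: cs =>
    if PySem.Chars.isdigit c then runsAux i (acc ++ [c]) (iacc ++ [(i, j)]) (j + 1) cs
    else if acc = [] then runsAux i acc iacc (j + 1) cs
    else (keyOf i j acc, iacc) :: runsAux i [] [] (j + 1) cs

theorem aLoop_eq_runsAux (i : Int) :
    ∀ (cs : List Char) (j : Int) (acc : List Char) (iacc : List (Int × Int))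
      (d : PySem.Dict String (List (Int × Int))),
    aFlush i (cs.foldl (aStep i) (j, acc, iacc, d)) =
      (runsAux i acc iacc j cs).foldl (fun d p => d.insert p.1 p.2) d := by
  intro cs
  induction cs with
  | nil =>
    intro j acc iacc d
    simp only [List.foldl, runsAux, aFlush]
    split <;> simp [List.foldl]
  | cons c rest ih =>
    intro j acc iacc d
    simp only [List.foldl, runsAux, aStep]
    by_cases hdig : PySem.Chars.isdigit c
    · simp only [hdig, if_pos]
      exact ih (j + 1) (acc ++ [c]) (iacc ++ [(i, j)]) d
    · simp only [hdig, if_false, Bool.false_eq_true]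
      by_cases hacc : acc = []
      · simp only [hacc, if_pos]
        exact ih (j + 1) [] iacc d
      · simp only [hacc, if_false, List.foldl]
        exact ih (j + 1) [] [] (d.insert (keyOf i j acc) iacc)

theorem bTakeRun_digits : ∀ cs : List Char, ∀ c ∈ (bTakeRun cs).1, PySem.Chars.isdigit c = true := by
  intro cs
  induction cs with
  | nil => simp [bTakeRun]
  | cons c rest ih =>
    simp only [bTakeRun]
    split
    · intro x hx
      rcases List.mem_cons.mp hx with h | h
      · subst h; assumption
      · exact ih x h
    · simp

theorem bTakeRun_append : ∀ cs : List Char, (bTakeRun cs).1 ++ (bTakeRun cs).2 = cs := by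
  intro cs
  induction cs with
  | nil => simp [bTakeRun]
  | cons c rest ih =>
    simp only [bTakeRun]
    split
    · simpa using ih
    · simp

theorem bTakeRun_head_not_digit :
    ∀ (cs : List Char) (c : Char) (t : List Char),
    (bTakeRun cs).2 = c :: t → PySem.Chars.isdigit c = false := by
  intro cs
  induction cs with
  | nil => simp [bTakeRun]
  | cons x rest ih =>
    simp only [bTakeRun]
    intro c t
    split
    · exact ih c t
    · rintro ⟨rfl, rfl⟩
      simpa using ‹¬ PySem.Chars.isdigit x = true›

-- scanning a block of digits just extends the pending run
theorem runsAux_digits (i : Int) :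
    ∀ (ds : List Char), (∀ c ∈ ds, PySem.Chars.isdigit c = true) →
    ∀ (rest : List Char) (acc : List Char) (iacc : List (Int × Int)) (j : Int),
    runsAux i acc iacc j (ds ++ rest) =
      runsAux i (acc ++ ds)
        (iacc ++ (PySem.List.pyRange j (j + ds.length) 1).map (fun col => (i, col)))
        (j + ds.length) rest := by
  intro ds
  induction ds with
  | nil => intro _ rest acc iacc j; simp [PySem.List.pyRange_one_eq_nil]
  | cons c ds ih =>
    intro hall rest acc iacc j
    have hc : PySem.Chars.isdigit c = true := hall c (List.mem_cons_self ..)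
    simp only [List.cons_append, runsAux, hc, if_pos]
    rw [ih (fun x hx => hall x (List.mem_cons_of_mem _ hx)) rest]
    have hlt : j < j + ((ds.length : Int) + 1) := by omega
    have hr : PySem.List.pyRange j (j + ((ds.length : Int) + 1)) 1 =
        j :: PySem.List.pyRange (j + 1) (j + ((ds.length : Int) + 1)) 1 :=
      PySem.List.pyRange_one_cons hlt
    have h1 : (j : Int) + (↑ds.length + 1) = j + 1 + ↑ds.length := by omega
    have h2 : ((c :: ds).length : Int) = (ds.length : Int) + 1 := by push_cast [List.length_cons]; ring
    rw [h2, hr, h1]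
    simp [List.append_assoc]

theorem bInner_eq_runsAux (i : Int) :
    ∀ (n : Nat) (cs : List Char), cs.length ≤ n →
    ∀ (j : Int) (d : PySem.Dict String (List (Int × Int))),
    bInner i j cs d = (runsAux i [] [] j cs).foldl (fun d p => d.insert p.1 p.2) d := by
  intro n
  induction n with
  | zero =>
    intro cs hlen j d
    have : cs = [] := List.eq_nil_of_length_eq_zero (Nat.le_zero.mp hlen)
    subst this
    simp [bInner, runsAux]
  | succ n ih =>
    intro cs hlen j d
    match cs with
    | [] => simp [bInner, runsAux]
    | c :: rest =>
      by_cases hdig : PySem.Chars.isdigit c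
      · simp only [bInner, hdig, if_pos]
        have hsplit := bTakeRun_append (c :: rest)
        have hds := bTakeRun_digits (c :: rest)
        set ds := (bTakeRun (c :: rest)).1 with hds_def
        set rest' := (bTakeRun (c :: rest)).2 with hrest_def
        have hru : runsAux i [] [] j (c :: rest) =
            runsAux i ds ((PySem.List.pyRange j (j + ds.length) 1).map (fun col => (i, col)))
              (j + ds.length) rest' := by
          conv_lhs => rw [← hsplit]
          simpa using runsAux_digits i ds hds rest' [] [] j
        have hds_ne : ds ≠ [] := by
          simp only [hds_def, bTakeRun, hdig, if_pos]
          simp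
        have hlen' : rest'.length ≤ n := by
          have h1 : rest'.length ≤ rest.length := by
            have := bTakeRun_snd_length_le (c :: rest)
            have hx : rest' = (bTakeRun rest).2 := by
              simp [hrest_def, bTakeRun, hdig]
            rw [hx]; exact bTakeRun_snd_length_le rest
          have h2 : rest.length + 1 ≤ n + 1 := hlen
          omega
        rw [hru]
        match hre : rest' with
        | [] =>
          simp only [runsAux, hds_ne, if_false, bInner, List.foldl]
        | c' :: t =>
          have hnd : PySem.Chars.isdigit c' = false := bTakeRun_head_not_digit (c :: rest) c' t hre
          simp only [runsAux, hnd, Bool.false_eq_true, if_false, hds_ne, List.foldl, bInner]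
          rw [ih t (by simp at hlen' ⊢; omega) (j + ds.length + 1)]
      · simp only [bInner, hdig, if_false, Bool.false_eq_true, runsAux, if_pos]
        exact ih rest (by simpa using Nat.lt_succ_iff.mp (Nat.lt_of_lt_of_le (Nat.lt_succ_self _) hlen)) (j + 1) d

theorem row_eq (i : Int) (d : PySem.Dict String (List (Int × Int))) (l : String) :
    aRow i d l = bInner i 0 l.toList d := by
  rw [aRow, aLoop_eq_runsAux, bInner_eq_runsAux i l.toList.length l.toList (le_refl _)]

-- ===== VERDICT (by name: the statement is the Claim_ definition above) =====
theorem get_numbers_coordinates_spec : Claim_equal_get_numbers_coordinates := by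
  intro matrix _
  unfold Spec_get_numbers_coordinates get_numbers_coordinates get_numbers_coordinates_alt
  congr 1
  have h : (fun (d : PySem.Dict String (List (Int × Int))) (p : Int × String) => aRow p.1 d p.2)
      = fun d p => bInner p.1 0 p.2.toList d := by
    funext d p
    exact row_eq p.1 d p.2
  rw [h]
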